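-- pv_equiv track=rewrite | github.com/AlexeyCheremisin/Rada | Tasks/Module_02/module_2_hard.py | get_password
-- ===== SOURCE A (Python) =====
-- def get_password(first_num):
--     pairs = list()
--     for i in range(1, 21):
--         for j in range(1, 21):
--             if i == j:
--                 continue
--             if first_num % (i + j) == 0:
--                 if len(pairs) > 0:
--                     if (j, i) not in pairs:
--                         pairs.append((i, j))
--                 else:
--                     pairs.append((i, j))
--     return pairs
-- ===== SOURCE B (Python) =====
-- def get_password(first_num):
--     return [(i, j) for i in range(1, 21) for j in range(i + 1, 21)
--             if first_num % (i + j) == 0]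
-- ===== Notes on version B (the rewrite author's own statement) =====
-- stated objective: simpler
-- what changed: Replaces the full 20x20 double loop with a maintained pairs list and a reversed-pair membership scan by a single upper-triangle comprehension (j from i+1), which needs no auxiliary list and no dedup test because each qualifying unordered pair is emitted exactly once.
import Mathlib
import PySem

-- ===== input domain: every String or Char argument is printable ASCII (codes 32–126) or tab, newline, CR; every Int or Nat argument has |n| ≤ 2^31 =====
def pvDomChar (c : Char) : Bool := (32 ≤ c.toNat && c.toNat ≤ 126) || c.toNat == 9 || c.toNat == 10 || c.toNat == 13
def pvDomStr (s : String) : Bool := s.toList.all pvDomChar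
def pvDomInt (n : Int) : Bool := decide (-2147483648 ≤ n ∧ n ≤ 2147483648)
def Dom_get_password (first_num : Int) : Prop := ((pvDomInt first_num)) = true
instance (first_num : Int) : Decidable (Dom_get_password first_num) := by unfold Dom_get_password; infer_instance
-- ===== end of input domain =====

-- B replaces A's full 20x20 loop with dedup-by-membership by a plain upper-triangle comprehension (simpler; same result, same order).

-- ===== PORT A =====
-- inner-loop body of A (one step for a fixed i and the current j)
def stepA (n i : Int) (pairs : List (Int × Int)) (j : Int) : List (Int × Int) :=
  if i = j then pairs
  else if PySem.Int.mod n (i + j) = 0 then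
    if pairs.length > 0 then
      if (j, i) ∈ pairs then pairs else pairs ++ [(i, j)]
    else pairs ++ [(i, j)]
  else pairs

def get_password (first_num : Int) : List (Int × Int) :=
  (PySem.List.pyRange 1 21 1).foldl
    (fun pairs i => (PySem.List.pyRange 1 21 1).foldl (stepA first_num i) pairs) []

-- ===== PORT B =====
-- one row of B's comprehension: the pairs produced for a fixed i
def altRow (n i : Int) : List (Int × Int) :=
  ((PySem.List.pyRange (i + 1) 21 1).filter
    (fun j => decide (PySem.Int.mod n (i + j) = 0))).map (fun j => (i, j))

def get_password_alt (first_num : Int) : List (Int × Int) :=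
  (PySem.List.pyRange 1 21 1).flatMap (altRow first_num)

-- ===== PRECONDITION & SPEC =====
def Spec_get_password (first_num : Int) (out : List (Int × Int)) : Prop := out = get_password_alt first_num
instance (first_num : Int) (out : List (Int × Int)) : Decidable (Spec_get_password first_num out) := by unfold Spec_get_password; infer_instance

-- ===== CLAIM (what is proved, stated in full; the proofs are below) =====
def Claim_equal_get_password : Prop := ∀ (first_num : Int), Dom_get_password first_num → Spec_get_password first_num (get_password first_num)

-- ===== LEMMAS AND PROOFS =====

lemma mem_altRow (n a : Int) (x y : Int) :
    (x, y) ∈ altRow n a ↔ x = a ∧ a < y ∧ y < 21 ∧ PySem.Int.mod n (a + y) = 0 := by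
  unfold altRow
  rw [List.mem_map]
  constructor
  · rintro ⟨j, hj, he⟩
    rw [List.mem_filter] at hj
    have hr := PySem.List.mem_pyRange_one.1 hj.1
    have hd := hj.2
    simp at he hd
    obtain ⟨h1, h2⟩ := he
    subst h1; subst h2
    exact ⟨rfl, by omega, hr.2, hd⟩
  · rintro ⟨hx, h1, h2, h3⟩
    subst hx
    refine ⟨y, ?_, rfl⟩
    rw [List.mem_filter]
    exact ⟨PySem.List.mem_pyRange_one.2 ⟨by omega, h2⟩, by simpa using h3⟩

lemma fst_lt_snd_altRow (n a : Int) {p : Int × Int} (hp : p ∈ altRow n a) : p.1 < p.2 := by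
  obtain ⟨x, y⟩ := p
  exact ((mem_altRow n a x y).1 hp).2.1.trans_le' (le_of_eq ((mem_altRow n a x y).1 hp).1)

-- A's inner loop, given that pairs only holds (a,b) with a<b and that reversed
-- candidates (j,i) for j<i are present exactly when the sum divides n.
lemma inner_eq (n i : Int) (js : List Int) (pairs : List (Int × Int))
    (H1 : ∀ p ∈ pairs, p.1 < p.2)
    (H2 : ∀ j ∈ js, j < i → ((j, i) ∈ pairs ↔ PySem.Int.mod n (i + j) = 0)) :
    js.foldl (stepA n i) pairs =
      pairs ++ (js.filter
        (fun j => decide (i < j) && decide (PySem.Int.mod n (i + j) = 0))).map (fun j => (i, j)) := by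
  induction js generalizing pairs with
  | nil => simp
  | cons j js ih =>
    have H2tail : ∀ j' ∈ js, j' < i → ((j', i) ∈ pairs ↔ PySem.Int.mod n (i + j') = 0) :=
      fun j' hj' => H2 j' (List.mem_cons_of_mem _ hj')
    simp only [List.foldl_cons, List.filter_cons]
    by_cases hij : i = j
    · subst hij
      have : stepA n i pairs i = pairs := by simp [stepA]
      rw [this]
      simpa using ih pairs H1 H2tail
    · by_cases hmod : PySem.Int.mod n (i + j) = 0
      · by_cases hji : j < i
        · have hmem : (j, i) ∈ pairs := (H2 j (List.mem_cons_self) hji).2 hmod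
          have hpos : pairs.length > 0 := List.length_pos_of_mem hmem
          have hstep : stepA n i pairs j = pairs := by
            simp [stepA, hij, hmod, hpos, hmem]
          have hcond : ¬ i < j := by omega
          rw [hstep]
          simpa [hcond] using ih pairs H1 H2tail
        · have hlt : i < j := by omega
          have hnot : (j, i) ∉ pairs := by
            intro h; have := H1 _ h; simp at this; omega
          have hstep : stepA n i pairs j = pairs ++ [(i, j)] := by
            unfold stepA
            rw [if_neg hij, if_pos hmod]
            by_cases h1 : pairs.length > 0
            · rw [if_pos h1, if_neg hnot]
            · rw [if_neg h1]
          have H1' : ∀ p ∈ pairs ++ [(i, j)], p.1 < p.2 := by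
            intro p hp
            rcases List.mem_append.1 hp with h | h
            · exact H1 p h
            · simp at h; subst h; simpa using hlt
          have H2' : ∀ j' ∈ js, j' < i →
              ((j', i) ∈ pairs ++ [(i, j)] ↔ PySem.Int.mod n (i + j') = 0) := by
            intro j' hj' hji'
            rw [List.mem_append]
            constructor
            · rintro (h | h)
              · exact (H2tail j' hj' hji').1 h
              · simp at h; omega
            · intro h; exact Or.inl ((H2tail j' hj' hji').2 h)
          rw [hstep, ih (pairs ++ [(i, j)]) H1' H2']
          simp [hlt, hmod, List.append_assoc]
      · have hstep : stepA n i pairs j = pairs := by simp [stepA, hij, hmod]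
        rw [hstep]
        simpa [hmod] using ih pairs H1 H2tail

-- B's row for i equals A's full-range inner filter, for 1 ≤ i.
lemma row_eq (n i : Int) (hi : 1 ≤ i) :
    ((PySem.List.pyRange 1 21 1).filter
      (fun j => decide (i < j) && decide (PySem.Int.mod n (i + j) = 0))).map (fun j => (i, j)) =
      altRow n i := by
  unfold altRow
  have hsplit := PySem.List.pyRange_one_append 1 (i + 1) 21
  by_cases h21 : (i + 1 : Int) ≤ 21
  · rw [hsplit (by omega) h21, List.filter_append]
    have hlo : (PySem.List.pyRange 1 (i + 1) 1).filter
        (fun j => decide (i < j) && decide (PySem.Int.mod n (i + j) = 0)) = [] := by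
      apply List.filter_eq_nil_iff.2
      intro j hj
      have := (PySem.List.mem_pyRange_one).1 hj
      simp; omega
    have hhi : (PySem.List.pyRange (i + 1) 21 1).filter
        (fun j => decide (i < j) && decide (PySem.Int.mod n (i + j) = 0)) =
        (PySem.List.pyRange (i + 1) 21 1).filter
        (fun j => decide (PySem.Int.mod n (i + j) = 0)) := by
      apply List.filter_congr
      intro j hj
      have := (PySem.List.mem_pyRange_one).1 hj
      simp; omega
    rw [hlo, hhi, List.nil_append]
  · have h1 : PySem.List.pyRange (i + 1) 21 1 = [] := PySem.List.pyRange_one_eq_nil (by omega)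
    have h2 : (PySem.List.pyRange 1 21 1).filter
        (fun j => decide (i < j) && decide (PySem.Int.mod n (i + j) = 0)) = [] := by
      apply List.filter_eq_nil_iff.2
      intro j hj
      have := (PySem.List.mem_pyRange_one).1 hj
      simp; omega
    rw [h1, h2]; rfl

-- outer induction: the first m outer iterations of A build exactly B's first m rows.
lemma outer_eq (n : Int) (m : Nat) (hm : m ≤ 20) :
    (PySem.List.pyRange 1 (1 + m) 1).foldl
      (fun pairs i => (PySem.List.pyRange 1 21 1).foldl (stepA n i) pairs) [] =
      (PySem.List.pyRange 1 (1 + m) 1).flatMap (altRow n) := by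
  induction m with
  | zero => simp [PySem.List.pyRange_one_eq_nil]
  | succ m ih =>
    have hm' : m ≤ 20 := by omega
    have hsucc : PySem.List.pyRange 1 (1 + (m + 1 : Nat)) 1 =
        PySem.List.pyRange 1 (1 + m) 1 ++ [(1 + m : Int)] := by
      have : (1 + ((m : Int) + 1)) = (1 + (m : Int)) + 1 := by ring
      push_cast
      rw [this, PySem.List.pyRange_one_succ_right (by omega)]
    rw [hsucc, List.foldl_append, List.flatMap_append, ih hm']
    simp only [List.foldl_cons, List.foldl_nil, List.flatMap_cons, List.flatMap_nil,
      List.append_nil]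
    set R := (PySem.List.pyRange 1 (1 + m) 1).flatMap (altRow n) with hR
    have H1 : ∀ p ∈ R, p.1 < p.2 := by
      intro p hp
      rcases List.mem_flatMap.1 hp with ⟨a, _, hpa⟩
      exact fst_lt_snd_altRow n a hpa
    have H2 : ∀ j ∈ PySem.List.pyRange 1 21 1, j < 1 + (m : Int) →
        ((j, 1 + (m : Int)) ∈ R ↔ PySem.Int.mod n ((1 + (m : Int)) + j) = 0) := by
      intro j hj hjm
      have hjr := (PySem.List.mem_pyRange_one).1 hj
      rw [hR, List.mem_flatMap]
      constructor
      · rintro ⟨a, _, hpa⟩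
        have h := (mem_altRow n a j (1 + m)).1 hpa
        have : PySem.Int.mod n (j + (1 + (m : Int))) = 0 := h.1 ▸ h.2.2.2
        rwa [add_comm] at this
      · intro hmod
        refine ⟨j, (PySem.List.mem_pyRange_one).2 ⟨hjr.1, by omega⟩, ?_⟩
        refine (mem_altRow n j j (1 + m)).2 ⟨rfl, hjm, by omega, ?_⟩
        rwa [add_comm]
    rw [inner_eq n (1 + m) (PySem.List.pyRange 1 21 1) R H1 H2,
      row_eq n (1 + m) (by omega)]

-- ===== VERDICT (by name: the statement is the Claim_ definition above) =====
theorem get_password_spec : Claim_equal_get_password := by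
  intro n _
  show get_password n = get_password_alt n
  have h := outer_eq n 20 (le_refl _)
  norm_num at h
  exact h
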